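-- pv_equiv track=rewrite | github.com/ActiveState/OpenKomodoIDE | src/scc/hg/pylib/hglib.py | _logItemFrom
-- ===== SOURCE A (Python) =====
-- def _logItemFrom(revision, message):
--     logItem = {'revision': revision.split(":", 1)[0]}
--     lines = message.rstrip().splitlines(0)
--     lineno = 0
--     for lineno in range(len(lines)):
--         line = lines[lineno]
--         split = line.split(":", 1)
--         if len(split) < 2:
--             continue
--         item_type = split[0]
--         if item_type == "user":
--             logItem['author'] = split[1].strip()
--         elif item_type == "date":
--             logItem['date'] = split[1].strip()
--         elif item_type == "files":
--             logItem['files'] = split[1].strip()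
--         elif item_type == "parent":
--             logItem['parent'] = split[1].strip()
--         elif item_type == "description":
--             logItem['message'] = "\n".join(lines[lineno+1:])
--             break
--     return logItem
-- ===== SOURCE B (Python) =====
-- def _desc(l):
--     kv = l.split(':', 1)
--     return len(kv) > 1 and kv[0] == 'description'
--
--
-- def _logItemFrom(revision, message):
--     lines = message.rstrip().splitlines(0)
--     idx = next((i for i, l in enumerate(lines) if _desc(l)), None)
--     header = lines if idx is None else lines[:idx]
--     fields = {'user': 'author', 'date': 'date', 'files': 'files', 'parent': 'parent'}
--     logItem = {'revision': revision.split(':', 1)[0]}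
--     for l in header:
--         kv = l.split(':', 1)
--         if len(kv) > 1 and kv[0] in fields:
--             logItem[fields[kv[0]]] = kv[1].strip()
--     if idx is not None:
--         logItem['message'] = '\n'.join(lines[idx + 1:])
--     return logItem
-- ===== Notes on version B (the rewrite author's own statement) =====
-- stated objective: alternative
-- what changed: A's single index loop with an in-loop break on the description line is replaced by a boundary-find (first description line) followed by a field-map-driven fold over only the header lines, with the message joined separately.
import Mathlib
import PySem

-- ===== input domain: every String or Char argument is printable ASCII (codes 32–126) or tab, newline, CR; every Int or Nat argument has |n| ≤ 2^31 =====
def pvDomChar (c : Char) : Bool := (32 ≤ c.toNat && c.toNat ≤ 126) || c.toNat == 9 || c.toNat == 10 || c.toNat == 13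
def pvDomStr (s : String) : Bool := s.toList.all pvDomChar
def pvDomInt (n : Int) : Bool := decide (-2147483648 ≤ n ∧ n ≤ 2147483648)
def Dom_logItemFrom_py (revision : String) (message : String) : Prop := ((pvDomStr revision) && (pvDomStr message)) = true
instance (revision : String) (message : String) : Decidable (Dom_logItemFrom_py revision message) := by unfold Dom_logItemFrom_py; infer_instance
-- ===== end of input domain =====

-- B replaces A's index loop with break by a description-boundary find followed by a
-- field-map fold over the header lines only (alternative decomposition, same cost).


-- ===== PORT A =====
-- the for-loop over range(len(lines)) with its break, as index recursion
def logA_loop (lines : List String) (lineno : Nat) (d : PySem.Dict String String) :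
    PySem.Dict String String :=
  if h : lineno < lines.length then
    let line := lines[lineno]
    let split := (PySem.Str.splitMax? line ":" 1).getD []   -- sep ":" ≠ "", never none
    if split.length < 2 then logA_loop lines (lineno + 1) d
    else
      let item_type := split.getD 0 ""
      if item_type == "user" then
        logA_loop lines (lineno + 1) (d.insert "author" (PySem.Str.strip (split.getD 1 "")))
      else if item_type == "date" then
        logA_loop lines (lineno + 1) (d.insert "date" (PySem.Str.strip (split.getD 1 "")))
      else if item_type == "files" then
        logA_loop lines (lineno + 1) (d.insert "files" (PySem.Str.strip (split.getD 1 "")))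
      else if item_type == "parent" then
        logA_loop lines (lineno + 1) (d.insert "parent" (PySem.Str.strip (split.getD 1 "")))
      else if item_type == "description" then
        d.insert "message" (PySem.Str.join "\n" (PySem.List.slice lines (some ((lineno : Int) + 1)) none))
      else logA_loop lines (lineno + 1) d
  else d
termination_by lines.length - lineno

def logItemFrom_py (revision : String) (message : String) : List (String × String) :=
  let logItem : PySem.Dict String String :=
    PySem.Dict.ofList [("revision", ((PySem.Str.splitMax? revision ":" 1).getD []).getD 0 "")]
  let lines := PySem.Str.splitlines (PySem.Str.rstrip message)
  (logA_loop lines 0 logItem).items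

-- ===== PORT B =====
def descB (l : String) : Bool :=
  let kv := (PySem.Str.splitMax? l ":" 1).getD []
  decide (1 < kv.length) && (kv.getD 0 "" == "description")

def fieldsB : PySem.Dict String String :=
  PySem.Dict.ofList [("user", "author"), ("date", "date"), ("files", "files"), ("parent", "parent")]

def stepB (d : PySem.Dict String String) (l : String) : PySem.Dict String String :=
  let kv := (PySem.Str.splitMax? l ":" 1).getD []
  if 1 < kv.length then
    match fieldsB.get? (kv.getD 0 "") with
    | some f => d.insert f (PySem.Str.strip (kv.getD 1 ""))
    | none => d
  else d

def logItemFrom_py_alt (revision : String) (message : String) : List (String × String) :=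
  let lines := PySem.Str.splitlines (PySem.Str.rstrip message)
  let idx := lines.findIdx? descB
  let header := match idx with
    | none => lines
    | some i => PySem.List.slice lines none (some (i : Int))
  let d0 : PySem.Dict String String :=
    PySem.Dict.ofList [("revision", ((PySem.Str.splitMax? revision ":" 1).getD []).getD 0 "")]
  let d1 := header.foldl stepB d0
  let d2 := match idx with
    | none => d1
    | some i => d1.insert "message" (PySem.Str.join "\n" (PySem.List.slice lines (some ((i : Int) + 1)) none))
  d2.items

-- ===== PRECONDITION & SPEC =====
def Spec_logItemFrom_py (revision : String) (message : String) (out : List (String × String)) : Prop := out = logItemFrom_py_alt revision message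
instance (revision : String) (message : String) (out : List (String × String)) : Decidable (Spec_logItemFrom_py revision message out) := by unfold Spec_logItemFrom_py; infer_instance

-- ===== CLAIM (what is proved, stated in full; the proofs are below) =====
def Claim_equal_logItemFrom_py : Prop := ∀ (revision : String) (message : String), Dom_logItemFrom_py revision message → Spec_logItemFrom_py revision message (logItemFrom_py revision message)

-- ===== LEMMAS AND PROOFS =====

-- B's result, computed from the suffix of lines that A's loop still has to scan
def tailC (s : List String) (d : PySem.Dict String String) : PySem.Dict String String :=
  match s.findIdx? descB with
  | none => s.foldl stepB d
  | some j => ((s.take j).foldl stepB d).insert "message"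
      (PySem.Str.join "\n" (s.drop (j + 1)))

theorem tailC_cons (l : String) (t : List String) (d : PySem.Dict String String) :
    tailC (l :: t) d =
      if descB l then d.insert "message" (PySem.Str.join "\n" t)
      else tailC t (stepB d l) := by
  unfold tailC
  rw [List.findIdx?_cons]
  by_cases hp : descB l
  · simp [hp]
  · simp only [hp]
    cases hfind : List.findIdx? descB t <;> simp

theorem loopA_eq_tailC (lines : List String) (i : Nat) (d : PySem.Dict String String) :
    logA_loop lines i d = tailC (lines.drop i) d := by
  fun_induction logA_loop lines i d with
  | case1 lineno d hlt line split hlen ih =>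
    have hne : ¬ 1 < ((PySem.Str.splitMax? lines[lineno] ":" 1).getD []).length := by
      simp only [split, line] at hlen; omega
    rw [List.drop_eq_getElem_cons hlt, tailC_cons, ih]
    simp [descB, stepB, hne]
  | case2 lineno d hlt line split hlen item_type h ih =>
    have hlen2 : 1 < ((PySem.Str.splitMax? lines[lineno] ":" 1).getD []).length := by
      simp only [split, line] at hlen; omega
    have hkey : ((PySem.Str.splitMax? lines[lineno] ":" 1).getD [])[0]?.getD "" = "user" := by
      simpa [item_type, split, line, List.getD] using h
    rw [List.drop_eq_getElem_cons hlt, tailC_cons, ih]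
    simp [descB, stepB, hkey, hlen2, List.getD, show fieldsB.get? "user" = some "author" from rfl, show split[1]? = some (((PySem.Str.splitMax? lines[lineno] ":" 1).getD [])[1]) from List.getElem?_eq_getElem hlen2]
  | case3 lineno d hlt line split hlen item_type h1 h ih =>
    have hlen2 : 1 < ((PySem.Str.splitMax? lines[lineno] ":" 1).getD []).length := by
      simp only [split, line] at hlen; omega
    have hkey : ((PySem.Str.splitMax? lines[lineno] ":" 1).getD [])[0]?.getD "" = "date" := by
      simpa [item_type, split, line, List.getD] using h
    rw [List.drop_eq_getElem_cons hlt, tailC_cons, ih]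
    simp [descB, stepB, hkey, hlen2, List.getD, show fieldsB.get? "date" = some "date" from rfl, show split[1]? = some (((PySem.Str.splitMax? lines[lineno] ":" 1).getD [])[1]) from List.getElem?_eq_getElem hlen2]
  | case4 lineno d hlt line split hlen item_type h1 h2 h ih =>
    have hlen2 : 1 < ((PySem.Str.splitMax? lines[lineno] ":" 1).getD []).length := by
      simp only [split, line] at hlen; omega
    have hkey : ((PySem.Str.splitMax? lines[lineno] ":" 1).getD [])[0]?.getD "" = "files" := by
      simpa [item_type, split, line, List.getD] using h
    rw [List.drop_eq_getElem_cons hlt, tailC_cons, ih]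
    simp [descB, stepB, hkey, hlen2, List.getD, show fieldsB.get? "files" = some "files" from rfl, show split[1]? = some (((PySem.Str.splitMax? lines[lineno] ":" 1).getD [])[1]) from List.getElem?_eq_getElem hlen2]
  | case5 lineno d hlt line split hlen item_type h1 h2 h3 h ih =>
    have hlen2 : 1 < ((PySem.Str.splitMax? lines[lineno] ":" 1).getD []).length := by
      simp only [split, line] at hlen; omega
    have hkey : ((PySem.Str.splitMax? lines[lineno] ":" 1).getD [])[0]?.getD "" = "parent" := by
      simpa [item_type, split, line, List.getD] using h
    rw [List.drop_eq_getElem_cons hlt, tailC_cons, ih]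
    simp [descB, stepB, hkey, hlen2, List.getD, show fieldsB.get? "parent" = some "parent" from rfl, show split[1]? = some (((PySem.Str.splitMax? lines[lineno] ":" 1).getD [])[1]) from List.getElem?_eq_getElem hlen2]
  | case6 lineno d hlt line split hlen item_type h1 h2 h3 h4 h =>
    have hlen2 : 1 < ((PySem.Str.splitMax? lines[lineno] ":" 1).getD []).length := by
      simp only [split, line] at hlen; omega
    have hkey : ((PySem.Str.splitMax? lines[lineno] ":" 1).getD [])[0]?.getD "" = "description" := by
      simpa [item_type, split, line, List.getD] using h
    rw [List.drop_eq_getElem_cons hlt, tailC_cons]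
    have hd : descB lines[lineno] = true := by simp [descB, hkey, hlen2]
    rw [hd, if_pos rfl]
    have hc : ((lineno : Int) + 1) = ((lineno + 1 : Nat) : Int) := by push_cast; ring
    rw [hc, PySem.List.slice_from_natCast]
  | case7 lineno d hlt line split hlen item_type h1 h2 h3 h4 h ih =>
    have hlen2 : 1 < ((PySem.Str.splitMax? lines[lineno] ":" 1).getD []).length := by
      simp only [split, line] at hlen; omega
    have hkeys : ∀ k, k ∈ ["user", "date", "files", "parent", "description"] →
        ((PySem.Str.splitMax? lines[lineno] ":" 1).getD [])[0]?.getD "" ≠ k := by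
      intro k hk
      fin_cases hk <;>
        [ simpa [item_type, split, line, List.getD] using h1
        ; simpa [item_type, split, line, List.getD] using h2
        ; simpa [item_type, split, line, List.getD] using h3
        ; simpa [item_type, split, line, List.getD] using h4
        ; simpa [item_type, split, line, List.getD] using h ]
    have hfields : fieldsB = PySem.Dict.mk
        [("user", "author"), ("date", "date"), ("files", "files"), ("parent", "parent")] := by rfl
    have hnone : fieldsB.get? (((PySem.Str.splitMax? lines[lineno] ":" 1).getD [])[0]?.getD "") = none := by
      simp [hfields, PySem.Dict.get?,
        Ne.symm (hkeys "user" (by simp)), Ne.symm (hkeys "date" (by simp)),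
        Ne.symm (hkeys "files" (by simp)), Ne.symm (hkeys "parent" (by simp))]
    rw [List.drop_eq_getElem_cons hlt, tailC_cons, ih]
    have hd : descB lines[lineno] = false := by
      simp [descB, hkeys "description" (by simp)]
    rw [hd, if_neg (by simp)]
    simp [stepB, hnone]
  | case8 lineno d hlt =>
    rw [List.drop_eq_nil_of_le (Nat.le_of_not_lt hlt)]
    simp [tailC]

-- ===== VERDICT (by name: the statement is the Claim_ definition above) =====
theorem logItemFrom_py_spec : Claim_equal_logItemFrom_py := by
  intro revision message _
  unfold Spec_logItemFrom_py
  simp only [logItemFrom_py, logItemFrom_py_alt]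
  rw [loopA_eq_tailC]
  unfold tailC
  simp only [List.drop_zero]
  cases h : (PySem.Str.splitlines (PySem.Str.rstrip message)).findIdx? descB with
  | none => rfl
  | some j =>
    simp only [PySem.List.slice_to_natCast]
    have : ((j : Int) + 1) = ((j + 1 : Nat) : Int) := by push_cast; ring
    rw [this, PySem.List.slice_from_natCast]
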